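-- pv_equiv track=rewrite | github.com/AtomicHank/atomichank.github.io | milhist/modern/Soviet Bases/build_data.py | formation_line
-- ===== SOURCE A (Python) =====
-- FORMATION_SUFFIXES = {
--     "BN": "Battalion",
--     "RGT": "Regiment",
--     "BDE": "Brigade",
--     "DIV": "Division",
--     "CPS": "Corps",
-- }
--
-- def normalise_text(value: str | None) -> str:
--     return " ".join((value or "").split()).strip()
--
-- def format_echelon(number: str | None, unit_type: str | None, suffix: str | None) -> str:
--     parts = [normalise_text(number), normalise_text(unit_type)]
--     label = " ".join(part for part in parts if part)
--     if suffix and label: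
--         return f"{label} {suffix}"
--     return label
--
-- def formation_line(record: dict[str, str]) -> str:
--     parts = []
--
--     for key, suffix in FORMATION_SUFFIXES.items():
--         label = format_echelon(record.get(key), record.get(f"{key} Type"), suffix)
--         if label:
--             parts.append(label)
--
--     arm_label = " ".join(
--         part for part in [normalise_text(record.get("ARM")), normalise_text(record.get("ARM Type"))] if part
--     )
--     if arm_label:
--         parts.append(arm_label)
--
--     md_label = normalise_text(record.get("MD"))
--     if md_label:
--         parts.append(md_label)
--
--     return " | ".join(parts)
-- ===== SOURCE B (Python) =====
-- SPEC = [
--     ("BN", "BN Type", "Battalion"),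
--     ("RGT", "RGT Type", "Regiment"),
--     ("BDE", "BDE Type", "Brigade"),
--     ("DIV", "DIV Type", "Division"),
--     ("CPS", "CPS Type", "Corps"),
--     ("ARM", "ARM Type", None),
--     ("MD", None, None),
-- ]
--
-- def formation_line(record: dict[str, str]) -> str:
--     # Recursive, back-to-front: each call builds the tail of the line first,
--     # then prepends its own segment directly (no parts list, no final join).
--     def go(spec):
--         if not spec:
--             return ""
--         number_key, type_key, suffix = spec[0]
--         rest = go(spec[1:])
--         words = (record.get(number_key) or "").split()
--         if type_key is not None:
--             words += (record.get(type_key) or "").split()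
--         if not words:
--             return rest
--         segment = " ".join(words + ([suffix] if suffix is not None else []))
--         return segment if not rest else segment + " | " + rest
--     return go(SPEC)
-- ===== Notes on version B (the rewrite author's own statement) =====
-- stated objective: alternative
-- what changed: Replaces A's accumulate-then-join pipeline (normalise_text/format_echelon, a parts list, two ad-hoc ARM/MD blocks, final ' | '.join) by a single recursive function over one spec table that builds the line string directly back-to-front, prepending each segment to the already-built tail with no parts list and no final join.
import Mathlib
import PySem

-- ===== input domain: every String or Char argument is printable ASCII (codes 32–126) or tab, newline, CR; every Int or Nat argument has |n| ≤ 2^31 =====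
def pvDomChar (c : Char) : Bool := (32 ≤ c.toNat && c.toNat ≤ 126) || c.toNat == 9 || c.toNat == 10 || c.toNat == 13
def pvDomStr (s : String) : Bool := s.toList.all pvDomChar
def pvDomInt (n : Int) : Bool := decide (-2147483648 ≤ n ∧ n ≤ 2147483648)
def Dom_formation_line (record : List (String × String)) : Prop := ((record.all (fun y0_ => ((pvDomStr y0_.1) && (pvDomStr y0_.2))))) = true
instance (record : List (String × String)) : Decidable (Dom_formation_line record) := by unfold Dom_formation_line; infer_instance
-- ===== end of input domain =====

-- B replaces A's accumulate-then-join pipeline by one recursion over a spec table that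
-- builds the line back-to-front, prepending segments directly; objective: alternative.

-- dict.get on the association list (first match), shared by both ports
def pyGet (record : List (String × String)) (k : String) : Option String :=
  (record.find? (fun p => p.1 == k)).map (·.2)

-- ===== PORT A =====
def FORMATION_SUFFIXES : List (String × String) :=
  [("BN", "Battalion"), ("RGT", "Regiment"), ("BDE", "Brigade"),
   ("DIV", "Division"), ("CPS", "Corps")]

-- " ".join((value or "").split()).strip()
def normaliseText (value : Option String) : String :=
  PySem.Str.strip (PySem.Str.join " " (PySem.Str.split₀ (value.getD "")))

def formatEchelon (number unitType : Option String) (suffix : String) : String :=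
  let parts := [normaliseText number, normaliseText unitType]
  let label := PySem.Str.join " " (parts.filter (fun p => p != ""))
  if (suffix != "") && (label != "") then PySem.Str.join " " [label, suffix] else label

def formation_line (record : List (String × String)) : String :=
  let parts : List String :=
    FORMATION_SUFFIXES.foldl (fun parts kv =>
      let label := formatEchelon (pyGet record kv.1)
        (pyGet record (kv.1 ++ " Type")) kv.2
      if label != "" then parts ++ [label] else parts) []
  let armLabel := PySem.Str.join " "
    (([normaliseText (pyGet record "ARM"), normaliseText (pyGet record "ARM Type")]).filter
      (fun p => p != ""))
  let parts := if armLabel != "" then parts ++ [armLabel] else parts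
  let mdLabel := normaliseText (pyGet record "MD")
  let parts := if mdLabel != "" then parts ++ [mdLabel] else parts
  PySem.Str.join " | " parts

-- ===== PORT B =====
def SPEC : List (String × Option String × Option String) :=
  [("BN", some "BN Type", some "Battalion"),
   ("RGT", some "RGT Type", some "Regiment"),
   ("BDE", some "BDE Type", some "Brigade"),
   ("DIV", some "DIV Type", some "Division"),
   ("CPS", some "CPS Type", some "Corps"),
   ("ARM", some "ARM Type", none),
   ("MD", none, none)]

-- (record.get(k) or "").split()
def wordsOf (v : Option String) : List String :=
  PySem.Str.split₀ (v.getD "")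

-- the inner recursive 'go' of Source B: builds the tail first, then prepends its segment
def formation_line_go (record : List (String × String)) :
    List (String × Option String × Option String) → String
  | [] => ""
  | e :: spec =>
    let rest := formation_line_go record spec
    let words := wordsOf (pyGet record e.1)
    let words := words ++ (match e.2.1 with
      | some tk => wordsOf (pyGet record tk)
      | none => [])
    if words.isEmpty then rest
    else
      let segment := PySem.Str.join " " (words ++ (match e.2.2 with
        | some s => [s]
        | none => []))
      if rest == "" then segment else segment ++ " | " ++ rest

def formation_line_alt (record : List (String × String)) : String :=
  formation_line_go record SPEC

-- ===== PRECONDITION & SPEC =====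
def Spec_formation_line (record : List (String × String)) (out : String) : Prop := out = formation_line_alt record
instance (record : List (String × String)) (out : String) : Decidable (Spec_formation_line record out) := by unfold Spec_formation_line; infer_instance

-- ===== CLAIM (what is proved, stated in full; the proofs are below) =====
def Claim_equal_formation_line : Prop := ∀ (record : List (String × String)), Dom_formation_line record → Spec_formation_line record (formation_line record)

-- ===== LEMMAS AND PROOFS =====

def GoodWords (ws : List (List Char)) : Prop :=
  ∀ w ∈ ws, w ≠ [] ∧ ∀ c ∈ w, PySem.Chars.isspace c = false

theorem split₀_go_good (s : List Char) : ∀ (cur : List Char) (acc : List (List Char)),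
    (∀ c ∈ cur, PySem.Chars.isspace c = false) → GoodWords acc →
    GoodWords (PySem.Chars.split₀.go s cur acc) := by
  induction s with
  | nil =>
    intro cur acc hcur hacc
    unfold PySem.Chars.split₀.go
    split
    · intro w hw; exact hacc w (List.mem_reverse.mp hw)
    · rename_i hne
      intro w hw
      rcases List.mem_cons.mp (List.mem_reverse.mp hw) with h | h
      · subst h
        constructor
        · simp only [ne_eq, List.reverse_eq_nil_iff]
          exact fun h => hne (by simp [h])
        · intro c hc; exact hcur c (List.mem_reverse.mp hc)
      · exact hacc w h
  | cons c rest ih =>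
    intro cur acc hcur hacc
    unfold PySem.Chars.split₀.go
    split
    · split
      · exact ih [] acc (by simp) hacc
      · rename_i hsp hne
        refine ih [] _ (by simp) ?_
        intro w hw
        rcases List.mem_cons.mp hw with h | h
        · subst h
          refine ⟨by simpa using fun h => hne (by simp [h]), ?_⟩
          intro d hd; exact hcur d (List.mem_reverse.mp hd)
        · exact hacc w h
    · rename_i hsp
      refine ih (c :: cur) acc ?_ hacc
      intro d hd
      rcases List.mem_cons.mp hd with h | h
      · rw [h]; simpa using hsp
      · exact hcur d h

theorem split₀_good (s : List Char) : GoodWords (PySem.Chars.split₀ s) :=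
  split₀_go_good s [] [] (by simp) (by intro w hw; simp at hw)

theorem join_cons (sep w : List Char) (rest : List (List Char)) :
    PySem.Chars.join sep (w :: rest) =
      w ++ (if rest.isEmpty then [] else sep ++ PySem.Chars.join sep rest) := by
  cases rest with
  | nil => simp [PySem.Chars.join_singleton]
  | cons q r => simp [PySem.Chars.join_cons_cons]

theorem join_append (sep : List Char) (xs ys : List (List Char))
    (hx : xs ≠ []) (hy : ys ≠ []) :
    PySem.Chars.join sep (xs ++ ys) =
      PySem.Chars.join sep xs ++ sep ++ PySem.Chars.join sep ys := by
  induction xs with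
  | nil => simp at hx
  | cons w xs ih =>
    cases xs with
    | nil =>
      cases ys with
      | nil => simp at hy
      | cons y ys' => simp [PySem.Chars.join_cons_cons, PySem.Chars.join_singleton]
    | cons w2 xs' =>
      have := ih (by simp)
      simp only [List.cons_append, PySem.Chars.join_cons_cons] at *
      simp [this]

theorem join_reverse (sep : List Char) (ws : List (List Char)) :
    (PySem.Chars.join sep ws).reverse =
      PySem.Chars.join sep.reverse ((ws.map List.reverse).reverse) := by
  induction ws with
  | nil => simp [PySem.Chars.join_nil]
  | cons w rest ih =>
    cases rest with
    | nil => simp [PySem.Chars.join_singleton]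
    | cons q r =>
      rw [PySem.Chars.join_cons_cons, List.map_cons, List.reverse_cons]
      rw [join_append sep.reverse _ _ (by simp) (by simp)]
      simp [ih, PySem.Chars.join_singleton]

theorem lstrip_noop (xs : List Char)
    (h : ∀ c, xs.head? = some c → PySem.Chars.isspace c = false) :
    PySem.Chars.lstrip xs = xs := by
  cases xs with
  | nil => rfl
  | cons c rest =>
    unfold PySem.Chars.lstrip
    rw [List.dropWhile_cons]
    simp [h c rfl]

theorem good_reverse (ws : List (List Char)) (h : GoodWords ws) :
    GoodWords ((ws.map List.reverse).reverse) := by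
  intro w hw
  simp only [List.mem_reverse, List.mem_map] at hw
  obtain ⟨v, hv, rfl⟩ := hw
  obtain ⟨h1, h2⟩ := h v hv
  exact ⟨by simpa using h1, fun c hc => h2 c (List.mem_reverse.mp hc)⟩

theorem head_join_nonspace (ws : List (List Char)) (h : GoodWords ws) :
    ∀ c, (PySem.Chars.join [' '] ws).head? = some c → PySem.Chars.isspace c = false := by
  intro c hc
  cases ws with
  | nil => simp [PySem.Chars.join_nil] at hc
  | cons w rest =>
    rw [join_cons, List.head?_append] at hc
    obtain ⟨h1, h2⟩ := h w (by simp)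
    cases hw : w.head? with
    | none => exact absurd (List.head?_eq_none_iff.mp hw) h1
    | some d =>
      rw [hw] at hc
      rw [Option.some_or] at hc
      cases hc
      exact h2 c (List.mem_of_mem_head? hw)

theorem strip_join (ws : List (List Char)) (h : GoodWords ws) :
    PySem.Chars.strip (PySem.Chars.join [' '] ws) = PySem.Chars.join [' '] ws := by
  unfold PySem.Chars.strip PySem.Chars.rstrip
  rw [lstrip_noop _ (head_join_nonspace ws h)]
  have hrev : (PySem.Chars.join [' '] ws).reverse
      = PySem.Chars.join [' '] ((ws.map List.reverse).reverse) := by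
    simpa using join_reverse [' '] ws
  rw [hrev]
  have : List.dropWhile PySem.Chars.isspace (PySem.Chars.join [' '] ((ws.map List.reverse).reverse))
      = PySem.Chars.join [' '] ((ws.map List.reverse).reverse) :=
    lstrip_noop _ (head_join_nonspace _ (good_reverse ws h))
  rw [this, ← hrev, List.reverse_reverse]

theorem good_wordsOf (v : Option String) :
    GoodWords (List.map String.toList (wordsOf v)) := by
  unfold wordsOf
  rw [PySem.Str.split₀_map_toList]
  exact split₀_good _

theorem good_append (ws1 ws2 : List String)
    (h1 : GoodWords (ws1.map String.toList)) (h2 : GoodWords (ws2.map String.toList)) :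
    GoodWords ((ws1 ++ ws2).map String.toList) := by
  intro w hw
  rw [List.map_append] at hw
  rcases List.mem_append.mp hw with h | h
  · exact h1 w h
  · exact h2 w h

theorem sp_toList : (" " : String).toList = [' '] := by decide

theorem ne_empty_of_good (ws : List String) (h : GoodWords (ws.map String.toList)) :
    ∀ w ∈ ws, w ≠ "" := by
  intro w hw he
  have := (h w.toList (List.mem_map_of_mem hw)).1
  rw [he] at this
  exact this (by decide)

theorem join_ne_nil (ws : List (List Char)) (h : ∀ w ∈ ws, w ≠ []) (hne : ws ≠ []) :
    PySem.Chars.join [' '] ws ≠ [] := by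
  cases ws with
  | nil => simp at hne
  | cons w rest =>
    rw [join_cons]
    have hw : w ≠ [] := h w (by simp)
    simp [hw]

theorem joinS_empty_iff (ws : List String) (h : ∀ w ∈ ws, w ≠ "") :
    (PySem.Str.join " " ws = "") ↔ ws = [] := by
  constructor
  · intro he
    by_contra hne
    have ht : (PySem.Str.join " " ws).toList = [] := by rw [he]; decide
    rw [PySem.Str.toList_join, sp_toList] at ht
    refine join_ne_nil (ws.map String.toList) ?_ (by simpa using hne) ht
    intro w hw
    obtain ⟨v, hv, rfl⟩ := List.mem_map.mp hw
    intro hcon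
    exact h v hv (String.toList_inj.mp (by simpa using hcon))
  · intro h; subst h
    rw [← String.toList_inj, PySem.Str.toList_join]
    decide

theorem normS (v : Option String) : normaliseText v = PySem.Str.join " " (wordsOf v) := by
  unfold normaliseText
  rw [← String.toList_inj, PySem.Str.toList_strip, PySem.Str.toList_join, sp_toList,
    PySem.Str.toList_join, sp_toList]
  exact strip_join _ (good_wordsOf v)

theorem joinS_append (ws1 ws2 : List String) (h1 : ws1 ≠ []) (h2 : ws2 ≠ []) :
    PySem.Str.join " " (ws1 ++ ws2)
      = PySem.Str.join " " [PySem.Str.join " " ws1, PySem.Str.join " " ws2] := by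
  rw [← String.toList_inj]
  simp only [PySem.Str.toList_join, sp_toList, List.map_append, List.map_cons, List.map_nil]
  rw [join_append [' '] _ _ (by simpa using h1) (by simpa using h2)]
  rw [PySem.Chars.join_cons_cons, PySem.Chars.join_singleton]

theorem joinS_singleton (x : String) (sep : String) : PySem.Str.join sep [x] = x := by
  rw [← String.toList_inj, PySem.Str.toList_join, List.map_cons, List.map_nil,
    PySem.Chars.join_singleton]

theorem merge_filter (ws1 ws2 : List String)
    (h1 : GoodWords (ws1.map String.toList)) (h2 : GoodWords (ws2.map String.toList)) :
    PySem.Str.join " "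
      (([PySem.Str.join " " ws1, PySem.Str.join " " ws2]).filter (fun p => p != ""))
      = PySem.Str.join " " (ws1 ++ ws2) := by
  by_cases e1 : ws1 = [] <;> by_cases e2 : ws2 = []
  · subst e1; subst e2; rfl
  · subst e1
    have n2 : PySem.Str.join " " ws2 ≠ "" := fun h => e2 ((joinS_empty_iff ws2 (ne_empty_of_good _ h2)).mp h)
    have hj : PySem.Str.join " " ([] : List String) = "" := rfl
    simp [hj, n2, joinS_singleton]
  · subst e2
    have n1 : PySem.Str.join " " ws1 ≠ "" := fun h => e1 ((joinS_empty_iff ws1 (ne_empty_of_good _ h1)).mp h)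
    have hj : PySem.Str.join " " ([] : List String) = "" := rfl
    simp [hj, n1, joinS_singleton]
  · have n1 : PySem.Str.join " " ws1 ≠ "" := fun h => e1 ((joinS_empty_iff ws1 (ne_empty_of_good _ h1)).mp h)
    have n2 : PySem.Str.join " " ws2 ≠ "" := fun h => e2 ((joinS_empty_iff ws2 (ne_empty_of_good _ h2)).mp h)
    simp [n1, n2, joinS_append ws1 ws2 e1 e2]

-- word list of one spec entry, and its optional segment (the canonical form both sides reach)
def wsOf (record : List (String × String)) (e : String × Option String × Option String) :
    List String :=
  wordsOf (pyGet record e.1) ++ (match e.2.1 with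
    | some tk => wordsOf (pyGet record tk)
    | none => [])

def segOf (ws : List String) (suf : Option String) : Option String :=
  if ws.isEmpty then none else some (PySem.Str.join " " (ws ++ suf.toList))

def optSeg (record : List (String × String)) (e : String × Option String × Option String) :
    Option String :=
  segOf (wsOf record e) e.2.2

-- canonical step A's fold reduces to
def stepC (parts : List String) (ws : List String) (suf : Option String) : List String :=
  if ws.isEmpty then parts else parts ++ [PySem.Str.join " " (ws ++ suf.toList)]

theorem stepC_eq (parts ws : List String) (suf : Option String) :
    stepC parts ws suf = parts ++ (segOf ws suf).toList := by
  unfold stepC segOf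
  split <;> simp

theorem joinS_ne (ws : List String) (h : ∀ w ∈ ws, w ≠ "") (hne : ws ≠ []) :
    PySem.Str.join " " ws ≠ "" :=
  fun he => hne ((joinS_empty_iff ws h).mp he)

theorem join_head_ne (sep a : String) (l : List String) (h : a ≠ "") :
    PySem.Str.join sep (a :: l) ≠ "" := by
  intro he
  have ht : (PySem.Str.join sep (a :: l)).toList = [] := by rw [he]; decide
  rw [PySem.Str.toList_join, List.map_cons, join_cons, List.append_eq_nil_iff] at ht
  exact h (String.toList_inj.mp (by simpa using ht.1))

theorem good_wsOf (record : List (String × String))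
    (e : String × Option String × Option String) :
    GoodWords ((wsOf record e).map String.toList) := by
  unfold wsOf
  refine good_append _ _ (good_wordsOf _) ?_
  cases e.2.1 with
  | none => intro w hw; simp at hw
  | some tk => exact good_wordsOf _

theorem seg_ne (record : List (String × String))
    (e : String × Option String × Option String) (s : String)
    (h : optSeg record e = some s) : s ≠ "" := by
  unfold optSeg segOf at h
  split at h
  · exact absurd h (by simp)
  · rename_i hne
    cases hws : wsOf record e with
    | nil => rw [hws] at hne; simp at hne
    | cons w tl =>
      rw [hws] at h
      have hw : w ≠ "" :=
        ne_empty_of_good _ (good_wsOf record e) w (by rw [hws]; simp)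
      rw [Option.some_inj] at h
      subst h
      simpa using join_head_ne " " w (tl ++ e.2.2.toList) hw

theorem joinBar_cons (a : String) (l : List String) :
    PySem.Str.join " | " (a :: l)
      = if l.isEmpty then a else a ++ " | " ++ PySem.Str.join " | " l := by
  cases l with
  | nil => simp [joinS_singleton]
  | cons b r =>
    rw [if_neg (by simp)]
    rw [← String.toList_inj]
    simp only [String.toList_append, PySem.Str.toList_join, List.map_cons]
    rw [join_cons]
    simp

theorem filterMap_cons_toList {α β : Type} (f : α → Option β) (a : α) (l : List α) :
    (a :: l).filterMap f = (f a).toList ++ l.filterMap f := by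
  cases h : f a <;> simp [h]

theorem go_eq_join (record : List (String × String))
    (spec : List (String × Option String × Option String)) :
    formation_line_go record spec
      = PySem.Str.join " | " (spec.filterMap (optSeg record)) := by
  induction spec with
  | nil => rfl
  | cons e rest ih =>
    unfold formation_line_go
    simp only
    rw [ih]
    by_cases hws : (wsOf record e).isEmpty
    · have hnone : optSeg record e = none := by
        unfold optSeg segOf; simp [hws]
      rw [if_pos (by simpa [wsOf] using hws)]
      rw [List.filterMap_cons, hnone]
    · have hsome : optSeg record e
          = some (PySem.Str.join " " (wsOf record e ++ e.2.2.toList)) := by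
        unfold optSeg segOf; simp [hws]
      rw [if_neg (by simpa [wsOf] using hws)]
      rw [List.filterMap_cons, hsome]
      have hseg : (PySem.Str.join " " ((wordsOf (pyGet record e.1) ++ (match e.2.1 with
          | some tk => wordsOf (pyGet record tk)
          | none => [])) ++ (match e.2.2 with | some s => [s] | none => [])))
          = PySem.Str.join " " (wsOf record e ++ e.2.2.toList) := by
        unfold wsOf
        cases e.2.2 <;> simp [Option.toList]
      rw [hseg, joinBar_cons]
      have h0 : PySem.Str.join " | " ([] : List String) = "" := by decide
      cases hrest : rest.filterMap (optSeg record) with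
      | nil => simp [h0]
      | cons s tl =>
        have hs : s ≠ "" := by
          have hmem : s ∈ rest.filterMap (optSeg record) := by rw [hrest]; simp
          obtain ⟨e', _, he'⟩ := List.mem_filterMap.mp hmem
          exact seg_ne record e' s he'
        have hne : PySem.Str.join " | " (s :: tl) ≠ "" := join_head_ne _ _ _ hs
        simp [hne]

theorem stepA_suffix (parts : List String) (n t : Option String) (suf : String)
    (hsuf : suf ≠ "") :
    (if formatEchelon n t suf != "" then parts ++ [formatEchelon n t suf] else parts)
      = stepC parts (wordsOf n ++ wordsOf t) (some suf) := by
  have hg1 := good_wordsOf n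
  have hg2 := good_wordsOf t
  have hg := good_append _ _ hg1 hg2
  have hwne := ne_empty_of_good _ hg
  have hlab : PySem.Str.join " "
      (([normaliseText n, normaliseText t]).filter (fun p => p != ""))
      = PySem.Str.join " " (wordsOf n ++ wordsOf t) := by
    rw [normS n, normS t]; exact merge_filter _ _ hg1 hg2
  have hj : PySem.Str.join " " ([] : List String) = "" := rfl
  unfold formatEchelon stepC
  simp only [hlab]
  by_cases he : (wordsOf n ++ wordsOf t) = []
  · simp [he, hj]
  · have hne := joinS_ne _ hwne he
    have hv : PySem.Str.join " " [PySem.Str.join " " (wordsOf n ++ wordsOf t), suf]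
        = PySem.Str.join " " (wordsOf n ++ wordsOf t ++ [suf]) := by
      rw [joinS_append (wordsOf n ++ wordsOf t) [suf] he (by simp)]
      simp [joinS_singleton]
    have hvne : PySem.Str.join " " (wordsOf n ++ wordsOf t ++ [suf]) ≠ "" := by
      refine joinS_ne _ ?_ (by simp)
      intro w hw
      rcases List.mem_append.mp hw with h | h
      · exact hwne w h
      · simp at h; subst h; exact hsuf
    rw [List.append_assoc] at hvne
    simp [he, hne, hsuf, hv, hvne, List.isEmpty_iff]

theorem stepA_plain (parts : List String) (n t : Option String) :
    (if (PySem.Str.join " "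
          (([normaliseText n, normaliseText t]).filter (fun p => p != ""))) != "" then
        parts ++ [PySem.Str.join " "
          (([normaliseText n, normaliseText t]).filter (fun p => p != ""))]
      else parts)
      = stepC parts (wordsOf n ++ wordsOf t) none := by
  have hg1 := good_wordsOf n
  have hg2 := good_wordsOf t
  have hg := good_append _ _ hg1 hg2
  have hlab : PySem.Str.join " "
      (([normaliseText n, normaliseText t]).filter (fun p => p != ""))
      = PySem.Str.join " " (wordsOf n ++ wordsOf t) := by
    rw [normS n, normS t]; exact merge_filter _ _ hg1 hg2
  have hj : PySem.Str.join " " ([] : List String) = "" := rfl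
  unfold stepC
  simp only [hlab]
  by_cases he : (wordsOf n ++ wordsOf t) = []
  · simp [he, hj]
  · have hne := joinS_ne _ (ne_empty_of_good _ hg) he
    simp [he, hne, List.isEmpty_iff]

theorem stepA_md (parts : List String) (v : Option String) :
    (if normaliseText v != "" then parts ++ [normaliseText v] else parts)
      = stepC parts (wordsOf v) none := by
  have hg := good_wordsOf v
  have hj : PySem.Str.join " " ([] : List String) = "" := rfl
  unfold stepC
  rw [normS v]
  by_cases he : wordsOf v = []
  · simp [he, hj]
  · have hne := joinS_ne _ (ne_empty_of_good _ hg) he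
    simp [he, hne, List.isEmpty_iff]

set_option maxHeartbeats 1000000 in
theorem main_thm (record : List (String × String)) :
    formation_line record = formation_line_alt record := by
  have e1 : ("BN" ++ " Type" : String) = "BN Type" := rfl
  have e2 : ("RGT" ++ " Type" : String) = "RGT Type" := rfl
  have e3 : ("BDE" ++ " Type" : String) = "BDE Type" := rfl
  have e4 : ("DIV" ++ " Type" : String) = "DIV Type" := rfl
  have e5 : ("CPS" ++ " Type" : String) = "CPS Type" := rfl
  unfold formation_line formation_line_alt FORMATION_SUFFIXES
  dsimp only [List.foldl_cons, List.foldl_nil]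
  rw [e1, e2, e3, e4, e5]
  rw [stepA_suffix _ _ _ _ (by decide), stepA_suffix _ _ _ _ (by decide),
    stepA_suffix _ _ _ _ (by decide), stepA_suffix _ _ _ _ (by decide),
    stepA_suffix _ _ _ _ (by decide), stepA_plain, stepA_md]
  rw [go_eq_join]
  unfold SPEC
  simp only [filterMap_cons_toList, List.filterMap_nil, stepC_eq]
  simp [optSeg, wsOf, Option.toList]

-- ===== VERDICT (by name: the statement is the Claim_ definition above) =====
theorem formation_line_spec : Claim_equal_formation_line := by
  intro record _
  unfold Spec_formation_line
  exact main_thm record
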